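-- pv_equiv track=rewrite | github.com/cfanning8/Poker_Project | Poker_Project/independent_simulations.py | has_consecutive_ranks
-- ===== SOURCE A (Python) =====
-- def has_consecutive_ranks(rank_values, size):
--     rank_values = sorted(set(rank_values))
--     for i in range(len(rank_values)):
--         consecutive = 1
--         for j in range(i+1, len(rank_values)):
--             if rank_values[j] == rank_values[j-1] + 1:
--                 consecutive += 1
--                 if consecutive >= size:
--                     return True
--             else:
--                 break
--     return False
-- ===== SOURCE B (Python) =====
-- def has_consecutive_ranks(rank_values, size):
--     vals = sorted(set(rank_values))
--     run = 1
--     for k in range(1, len(vals)):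
--         if vals[k] == vals[k - 1] + 1:
--             run += 1
--             if run >= size:
--                 return True
--         else:
--             run = 1
--     return False
-- ===== Notes on version B (the rewrite author's own statement) =====
-- stated objective: faster
-- what changed: replaced A's quadratic restart-at-every-index nested scan with a single linear pass over the sorted unique values that tracks the current consecutive-run length and resets it on a gap
import Mathlib
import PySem

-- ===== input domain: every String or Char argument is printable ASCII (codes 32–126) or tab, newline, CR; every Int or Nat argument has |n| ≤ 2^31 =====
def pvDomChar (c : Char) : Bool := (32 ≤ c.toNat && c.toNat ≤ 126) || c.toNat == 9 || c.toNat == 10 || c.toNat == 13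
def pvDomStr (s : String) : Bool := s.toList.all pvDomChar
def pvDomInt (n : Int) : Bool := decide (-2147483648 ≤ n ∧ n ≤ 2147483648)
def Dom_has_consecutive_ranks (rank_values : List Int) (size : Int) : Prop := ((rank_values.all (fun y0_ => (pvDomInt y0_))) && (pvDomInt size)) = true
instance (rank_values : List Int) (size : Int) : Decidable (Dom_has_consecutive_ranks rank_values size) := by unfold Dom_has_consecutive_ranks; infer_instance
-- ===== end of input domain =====

-- B replaces A's quadratic restart-at-every-index nested scan with one linear pass
-- tracking the current run length over the sorted unique values (objective: faster).

-- ===== PORT A =====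
-- inner 'for j in range(i+1, len(v))' loop: returns true on 'return True',
-- false on 'break' or on falling off the range (indices are always in range, so v[j] is v.getD j 0)
def hcrInner (v : List Int) (size : Int) (j : Nat) (consecutive : Int) : Bool :=
  if j < v.length then
    if v.getD j 0 = v.getD (j - 1) 0 + 1 then
      if consecutive + 1 ≥ size then true
      else hcrInner v size (j + 1) (consecutive + 1)
    else false
  else false
termination_by v.length - j

-- outer 'for i in range(len(v))' loop
def hcrOuter (v : List Int) (size : Int) (i : Nat) : Bool :=
  if i < v.length then
    if hcrInner v size (i + 1) 1 then true else hcrOuter v size (i + 1)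
  else false
termination_by v.length - i

def has_consecutive_ranks (rank_values : List Int) (size : Int) : Bool :=
  hcrOuter (PySem.List.sorted (PySem.Set.ofList rank_values) (fun x => x) false) size 0

-- ===== PORT B =====
-- single 'for k in range(1, len(vals))' pass with the current run length
def hcrScan (v : List Int) (size : Int) (k : Nat) (run : Int) : Bool :=
  if k < v.length then
    if v.getD k 0 = v.getD (k - 1) 0 + 1 then
      if run + 1 ≥ size then true
      else hcrScan v size (k + 1) (run + 1)
    else hcrScan v size (k + 1) 1
  else false
termination_by v.length - k

def has_consecutive_ranks_alt (rank_values : List Int) (size : Int) : Bool :=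
  hcrScan (PySem.List.sorted (PySem.Set.ofList rank_values) (fun x => x) false) size 1 1

-- ===== PRECONDITION & SPEC =====
def Spec_has_consecutive_ranks (rank_values : List Int) (size : Int) (out : Bool) : Prop := out = has_consecutive_ranks_alt rank_values size
instance (rank_values : List Int) (size : Int) (out : Bool) : Decidable (Spec_has_consecutive_ranks rank_values size out) := by unfold Spec_has_consecutive_ranks; infer_instance

-- ===== CLAIM (what is proved, stated in full; the proofs are below) =====
def Claim_equal_has_consecutive_ranks : Prop := ∀ (rank_values : List Int) (size : Int), Dom_has_consecutive_ranks rank_values size → Spec_has_consecutive_ranks rank_values size (has_consecutive_ranks rank_values size)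

-- ===== LEMMAS AND PROOFS =====

-- the inner counter is monotone: a larger starting count reaches the threshold sooner
theorem hcrInner_mono (v : List Int) (size : Int) (j : Nat) (c c' : Int)
    (hcc : c ≤ c') (h : hcrInner v size j c = true) : hcrInner v size j c' = true := by
  induction hn : v.length - j using Nat.strong_induction_on generalizing j c c' with
  | _ n ih =>
    unfold hcrInner at h ⊢
    by_cases hj : j < v.length
    · simp only [hj, if_true] at h ⊢
      by_cases hv : v.getD j 0 = v.getD (j - 1) 0 + 1
      · simp only [hv, if_true] at h ⊢
        by_cases hs' : c' + 1 ≥ size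
        · simp [hs']
        · have hs : ¬ c + 1 ≥ size := by omega
          simp only [hs, if_false] at h
          simp only [hs', if_false]
          exact ih (v.length - (j + 1)) (by omega) (j + 1) (c + 1) (c' + 1) (by omega) h rfl
      · rw [if_neg hv] at h; simp at h
    · rw [if_neg hj] at h; simp at h

-- one linear-scan step equals: the inner A-run from here, or else the rest of A's outer loop
theorem hcrScan_eq (v : List Int) (size : Int) (j : Nat) (c : Int) (hc : 1 ≤ c) :
    hcrScan v size j c = (hcrInner v size j c || hcrOuter v size j) := by
  induction hn : v.length - j using Nat.strong_induction_on generalizing j c with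
  | _ n ih =>
    unfold hcrScan hcrInner hcrOuter
    by_cases hj : j < v.length
    · simp only [hj, if_true]
      by_cases hv : v.getD j 0 = v.getD (j - 1) 0 + 1
      · simp only [hv, if_true]
        by_cases hs : c + 1 ≥ size
        · simp [hs]
        · simp only [hs, if_false]
          rw [ih (v.length - (j + 1)) (by omega) (j + 1) (c + 1) (by omega) rfl]
          unfold hcrOuter
          cases hinner : hcrInner v size (j + 1) 1 with
          | false => simp
          | true =>
            have : hcrInner v size (j + 1) (c + 1) = true :=
              hcrInner_mono v size (j + 1) 1 (c + 1) (by omega) hinner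
            simp [this]
      · simp only [hv, if_false]
        rw [ih (v.length - (j + 1)) (by omega) (j + 1) 1 le_rfl rfl]
        unfold hcrOuter
        simp
    · simp [hj]

theorem hcr_eq (v : List Int) (size : Int) :
    hcrOuter v size 0 = hcrScan v size 1 1 := by
  rw [hcrScan_eq v size 1 1 le_rfl]
  cases h : hcrInner v size 1 1 with
  | true =>
    have h0 : 0 < v.length := by
      by_contra h0
      rw [hcrInner] at h
      rw [if_neg (by omega : ¬ 1 < v.length)] at h
      simp at h
    conv_lhs => rw [hcrOuter]
    simp [h0, h]
  | false =>
    simp only [Bool.false_or]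
    by_cases h0 : 0 < v.length
    · conv_lhs => rw [hcrOuter]
      simp [h0, h]
    · have h1 : ¬ 1 < v.length := by omega
      conv_lhs => rw [hcrOuter]
      rw [hcrOuter]
      simp [h0, h1]

-- ===== VERDICT (by name: the statement is the Claim_ definition above) =====
theorem has_consecutive_ranks_spec : Claim_equal_has_consecutive_ranks := by
  intro rank_values size _
  unfold Spec_has_consecutive_ranks has_consecutive_ranks has_consecutive_ranks_alt
  exact hcr_eq _ _
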